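-- pv_equiv track=rewrite | github.com/NelsonJQ/TB2dic | src/prepro.py | _apply_ankanimation_token_overrides
-- ===== SOURCE A (Python) =====
-- from typing import Any, Dict, List, Optional, Set, Tuple
--
-- def _apply_ankanimation_token_overrides(tokens: Set[str], lang_prefix: str) -> Set[str]:
--     """Apply ANKANIMATION token overrides before dictionary filtering/export."""
--     out = {t for t in tokens if isinstance(t, str) and t}
--
--     if lang_prefix == 'es':
--         # 2) Force lowercase-only for this list (remove capitalized/other variants).
--         force_lower_only = [
--             "Brakmarianos", "Dragopavo", "Fab'huritus", "Núcrumos", "Selocosa", "Sadidas"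
--         ]
--         for base in force_lower_only:
--             base_cf = base.casefold()
--             out = {tok for tok in out if tok.casefold() != base_cf}
--             out.add(base.lower())
--
--         # 2B) Keep capitalized and add lowercase.
--         keep_both = ["Selacubo", "Selaculus", "Selasfera"]
--         for base in keep_both:
--             out.add(base)
--             out.add(base.lower())
--
--         # 3) Replace Mechasme -> Mecasma, and add mecasma/mecasmas if source had Mechasme.
--         if any(tok.casefold() == 'mechasme' for tok in out):
--             out = {tok for tok in out if tok.casefold() != 'mechasme'}
--             out.update({'Mecasma', 'mecasma', 'mecasmas'})
--
--     return out
-- ===== SOURCE B (Python) =====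
-- def _apply_ankanimation_token_overrides(tokens, lang_prefix):
--     """Single-pass variant: one removal-index build + one filter, then batch additions."""
--     cleaned = {t for t in tokens if isinstance(t, str) and t}
--     if lang_prefix != 'es':
--         return cleaned
--     force_lower_only = [
--         "Brakmarianos", "Dragopavo", "Fab'huritus", "Núcrumos", "Selocosa", "Sadidas"
--     ]
--     has_mechasme = any(t.casefold() == 'mechasme' for t in cleaned)
--     removal = {b.casefold() for b in force_lower_only}
--     if has_mechasme:
--         removal = removal | {'mechasme'}
--     out = {t for t in cleaned if t.casefold() not in removal}
--     out.update(b.lower() for b in force_lower_only)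
--     for b in ["Selacubo", "Selaculus", "Selasfera"]:
--         out.add(b)
--         out.add(b.lower())
--     if has_mechasme:
--         out.update(['Mecasma', 'mecasma', 'mecasmas'])
--     return out
-- ===== Notes on version B (the rewrite author's own statement) =====
-- stated objective: simpler
-- what changed: A rebuilds the whole set once per override word (six filter-and-rebuild passes plus a later mechasme rescan); B computes the mechasme flag once, builds a single removal set of casefolds, filters the cleaned set in one pass, and then adds all replacement words in one block.
import Mathlib
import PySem

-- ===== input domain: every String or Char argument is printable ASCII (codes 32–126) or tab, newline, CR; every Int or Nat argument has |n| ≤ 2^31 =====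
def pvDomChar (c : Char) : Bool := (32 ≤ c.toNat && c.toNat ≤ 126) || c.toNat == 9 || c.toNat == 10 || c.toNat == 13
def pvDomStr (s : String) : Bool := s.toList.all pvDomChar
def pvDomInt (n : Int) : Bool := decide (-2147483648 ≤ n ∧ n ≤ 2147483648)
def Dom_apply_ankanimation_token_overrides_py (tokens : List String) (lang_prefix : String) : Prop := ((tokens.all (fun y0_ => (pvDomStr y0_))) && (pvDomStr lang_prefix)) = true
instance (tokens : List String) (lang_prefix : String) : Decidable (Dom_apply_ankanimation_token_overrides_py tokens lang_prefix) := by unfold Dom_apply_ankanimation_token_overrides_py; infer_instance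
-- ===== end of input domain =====

-- B replaces A's six per-base rescan-and-rebuild passes by one removal-index build plus a single
-- filter pass and batch additions (objective: simpler/one pass). Return-value equivalence only:
-- the Python operates on sets; ports use PySem.Set insertion order.

-- casefold ported as PySem.Str.lower: exact here (tokens are ASCII under Dom_, and on the
-- module's own literals casefold coincides with lower).
def pvCF (s : String) : String := PySem.Str.lower s

-- ===== PORT A =====
def apply_ankanimation_token_overrides_py (tokens : List String) (lang_prefix : String) : List String :=
  -- {t for t in tokens if isinstance(t, str) and t}  (isinstance is always true at this type)
  let out : PySem.Set String := PySem.Set.ofList (tokens.filter (fun t => t != ""))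
  if lang_prefix = "es" then
    let force_lower_only := ["Brakmarianos", "Dragopavo", "Fab'huritus", "Núcrumos", "Selocosa", "Sadidas"]
    let out := force_lower_only.foldl (fun out base =>
      let base_cf := pvCF base
      let out := PySem.Set.ofList (out.filter (fun tok => pvCF tok != base_cf))
      PySem.Set.add out (PySem.Str.lower base)) out
    let keep_both := ["Selacubo", "Selaculus", "Selasfera"]
    let out := keep_both.foldl (fun out base =>
      PySem.Set.add (PySem.Set.add out base) (PySem.Str.lower base)) out
    if out.any (fun tok => pvCF tok == "mechasme") then
      -- out.update({'Mecasma','mecasma','mecasmas'}): literal set, iterated in insertion order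
      PySem.Set.update (PySem.Set.ofList (out.filter (fun tok => pvCF tok != "mechasme")))
        ["Mecasma", "mecasma", "mecasmas"]
    else out
  else out

-- ===== PORT B =====
def apply_ankanimation_token_overrides_py_alt (tokens : List String) (lang_prefix : String) : List String :=
  let cleaned : PySem.Set String := PySem.Set.ofList (tokens.filter (fun t => t != ""))
  if lang_prefix != "es" then cleaned
  else
    let force_lower_only := ["Brakmarianos", "Dragopavo", "Fab'huritus", "Núcrumos", "Selocosa", "Sadidas"]
    let has_mechasme := cleaned.any (fun t => pvCF t == "mechasme")
    let removal : PySem.Set String := PySem.Set.ofList (force_lower_only.map (fun b => pvCF b))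
    let removal := if has_mechasme then PySem.Set.union removal ["mechasme"] else removal
    let out : PySem.Set String :=
      PySem.Set.ofList (cleaned.filter (fun t => !(PySem.Set.contains removal (pvCF t))))
    let out := PySem.Set.update out (force_lower_only.map (fun b => PySem.Str.lower b))
    let out := ["Selacubo", "Selaculus", "Selasfera"].foldl
      (fun out b => PySem.Set.add (PySem.Set.add out b) (PySem.Str.lower b)) out
    if has_mechasme then PySem.Set.update out ["Mecasma", "mecasma", "mecasmas"] else out

-- ===== PRECONDITION & SPEC =====
def Spec_apply_ankanimation_token_overrides_py (tokens : List String) (lang_prefix : String) (out : List String) : Prop := out = apply_ankanimation_token_overrides_py_alt tokens lang_prefix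
instance (tokens : List String) (lang_prefix : String) (out : List String) : Decidable (Spec_apply_ankanimation_token_overrides_py tokens lang_prefix out) := by unfold Spec_apply_ankanimation_token_overrides_py; infer_instance

-- ===== CLAIM (what is proved, stated in full; the proofs are below) =====
def Claim_equal_apply_ankanimation_token_overrides_py : Prop := ∀ (tokens : List String) (lang_prefix : String), Dom_apply_ankanimation_token_overrides_py tokens lang_prefix → Spec_apply_ankanimation_token_overrides_py tokens lang_prefix (apply_ankanimation_token_overrides_py tokens lang_prefix)

-- ===== LEMMAS AND PROOFS =====

theorem pv_step_collapse (s : List String) (hs : s.Nodup) (q : String → Bool) (x : String) (hx : q x = false) :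
    PySem.Set.add (PySem.Set.ofList (s.filter q)) x = s.filter q ++ [x] := by
  rw [PySem.Set.ofList_eq_self_of_nodup _ (hs.filter q), PySem.Set.add_of_not_mem]
  intro h
  have := (List.mem_filter.mp h).2
  rw [hx] at this; exact Bool.false_ne_true this

theorem pv_filter_add (s : List String) (p : String → Bool) (x : String) (hx : p x = true) :
    (PySem.Set.add s x).filter p = PySem.Set.add (s.filter p) x := by
  by_cases h : x ∈ s
  · rw [PySem.Set.add_of_mem h, PySem.Set.add_of_mem (List.mem_filter.mpr ⟨h, hx⟩)]
  · rw [PySem.Set.add_of_not_mem h, PySem.Set.add_of_not_mem (fun hc => h (List.mem_filter.mp hc).1)]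
    simp [List.filter_append, hx]

theorem pv_any_add (s : List String) (x : String) (p : String → Bool) :
    (PySem.Set.add s x).any p = (s.any p || p x) := by
  by_cases h : x ∈ s
  · rw [PySem.Set.add_of_mem h]
    cases hp : p x with
    | false => simp
    | true =>
      have : s.any p = true := List.any_eq_true.mpr ⟨x, h, hp⟩
      simp [this]
  · rw [PySem.Set.add_of_not_mem h]; simp [List.any_append]

theorem pv_not_contains_all (l : List String) (x : String) :
    (!(PySem.Set.contains l x)) = l.all (fun c => x != c) := by
  induction l with
  | nil => simp [PySem.Set.contains]
  | cons c cs ih =>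
    simp only [List.all_cons, ← ih]
    by_cases h : x = c
    · subst h; simp [PySem.Set.contains]
    · simp [PySem.Set.contains, h]

theorem pv_fold2 (bases : List String) (s : List String) (hs : s.Nodup)
    (hnd : (bases.map PySem.Str.lower).Nodup)
    (hfix : ∀ b ∈ bases, PySem.Str.lower (PySem.Str.lower b) = PySem.Str.lower b) :
    bases.foldl (fun out base =>
      PySem.Set.add (PySem.Set.ofList (out.filter (fun tok => PySem.Str.lower tok != PySem.Str.lower base))) (PySem.Str.lower base)) s
      = s.filter (fun tok => bases.all (fun b => PySem.Str.lower tok != PySem.Str.lower b)) ++ bases.map PySem.Str.lower := by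
  induction bases generalizing s with
  | nil => simp
  | cons b bs ih =>
    simp only [List.foldl_cons]
    rw [pv_step_collapse s hs _ (PySem.Str.lower b) (by simp [hfix b (by simp)])]
    have hnd' : (bs.map PySem.Str.lower).Nodup := (List.nodup_cons.mp hnd).2
    have hnotin : PySem.Str.lower b ∉ bs.map PySem.Str.lower := (List.nodup_cons.mp hnd).1
    have hs' : (s.filter (fun tok => PySem.Str.lower tok != PySem.Str.lower b) ++ [PySem.Str.lower b]).Nodup := by
      refine (hs.filter _).append (List.nodup_singleton _) ?_
      intro a ha hb
      rw [List.mem_singleton] at hb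
      have h2 := (List.mem_filter.mp ha).2
      rw [hb, hfix b (by simp)] at h2
      simp at h2
    rw [ih _ hs' hnd' (fun b' hb' => hfix b' (by simp [hb']))]
    rw [List.filter_append]
    have hQ : (bs.all (fun b' => PySem.Str.lower (PySem.Str.lower b) != PySem.Str.lower b')) = true := by
      rw [List.all_eq_true]
      intro b' hb'
      rw [hfix b (by simp)]
      simp only [bne_iff_ne, ne_eq]
      intro he; exact hnotin (he ▸ List.mem_map_of_mem hb')
    simp only [List.filter_cons, List.filter_nil, hQ, List.filter_filter, List.append_assoc,
      List.singleton_append, if_pos]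
    rw [List.filter_congr (fun x _ => Bool.and_comm _ _)]
    simp [List.all_cons]


theorem pv_B_inner (C : List String) (hC : C.Nodup) (R LC' : List String)
    (hnd : LC'.Nodup) (hlow : ∀ x ∈ LC', PySem.Str.lower x ∈ R) :
    PySem.Set.update (PySem.Set.ofList (List.filter (fun t => !(PySem.Set.contains R (PySem.Str.lower t))) C)) LC'
      = List.filter (fun t => R.all fun c => PySem.Str.lower t != c) C ++ LC' := by
  rw [List.filter_congr (fun x _ => pv_not_contains_all R (PySem.Str.lower x))]
  rw [PySem.Set.ofList_eq_self_of_nodup _ (hC.filter _)]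
  refine PySem.Set.update_eq_append_of_disjoint _ _ hnd ?_
  intro x hx hmem
  have h2 := (List.mem_filter.mp hmem).2
  rw [List.all_eq_true] at h2
  have h3 := h2 _ (hlow x hx)
  simp at h3

theorem pv_condA (C : List String) :
    (List.any (List.foldl (fun out base => PySem.Set.add (PySem.Set.add out base) (PySem.Str.lower base)) (List.filter (fun tok => ((["brakmarianos", "dragopavo", "fab'huritus", "núcrumos", "selocosa", "sadidas"] : List String).all fun c => PySem.Str.lower tok != c)) C ++ (["brakmarianos", "dragopavo", "fab'huritus", "núcrumos", "selocosa", "sadidas"] : List String)) ["Selacubo", "Selaculus", "Selasfera"]) fun tok => PySem.Str.lower tok == "mechasme")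
      = List.any C (fun tok => PySem.Str.lower tok == "mechasme") := by
  simp only [List.foldl_cons, List.foldl_nil, pv_any_add, List.any_append]
  cases h1 : List.any C (fun tok => PySem.Str.lower tok == "mechasme") with
  | false =>
    have h2 : (List.filter (fun tok => ((["brakmarianos", "dragopavo", "fab'huritus", "núcrumos", "selocosa", "sadidas"] : List String).all fun c => PySem.Str.lower tok != c)) C).any (fun tok => PySem.Str.lower tok == "mechasme") = false := by
      rw [List.any_eq_false]
      intro x hx
      exact (List.any_eq_false.mp h1) x (List.mem_filter.mp hx).1
    rw [h2]
    decide
  | true =>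
    obtain ⟨t, ht, hp⟩ := List.any_eq_true.mp h1
    have he : PySem.Str.lower t = "mechasme" := eq_of_beq hp
    have h2 : (List.filter (fun tok => ((["brakmarianos", "dragopavo", "fab'huritus", "núcrumos", "selocosa", "sadidas"] : List String).all fun c => PySem.Str.lower tok != c)) C).any (fun tok => PySem.Str.lower tok == "mechasme") = true := by
      refine List.any_eq_true.mpr ⟨t, List.mem_filter.mpr ⟨ht, ?_⟩, hp⟩
      rw [he]; decide
    rw [h2]
    decide

theorem pv_A_true (C : List String) (hC : C.Nodup) :
    PySem.Set.ofList (List.filter (fun tok => PySem.Str.lower tok != "mechasme")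
        (List.foldl (fun out base => PySem.Set.add (PySem.Set.add out base) (PySem.Str.lower base)) (List.filter (fun tok => ((["brakmarianos", "dragopavo", "fab'huritus", "núcrumos", "selocosa", "sadidas"] : List String).all fun c => PySem.Str.lower tok != c)) C ++ (["brakmarianos", "dragopavo", "fab'huritus", "núcrumos", "selocosa", "sadidas"] : List String)) ["Selacubo", "Selaculus", "Selasfera"]))
      = List.foldl (fun out base => PySem.Set.add (PySem.Set.add out base) (PySem.Str.lower base)) (List.filter (fun t => ((["brakmarianos", "dragopavo", "fab'huritus", "núcrumos", "selocosa", "sadidas", "mechasme"] : List String).all fun c => PySem.Str.lower t != c)) C ++ (["brakmarianos", "dragopavo", "fab'huritus", "núcrumos", "selocosa", "sadidas"] : List String)) ["Selacubo", "Selaculus", "Selasfera"] := by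
  have hs2 : (List.filter (fun tok => ((["brakmarianos", "dragopavo", "fab'huritus", "núcrumos", "selocosa", "sadidas"] : List String).all fun c => PySem.Str.lower tok != c)) C ++ (["brakmarianos", "dragopavo", "fab'huritus", "núcrumos", "selocosa", "sadidas"] : List String)).Nodup := by
    refine (hC.filter _).append (by decide) ?_
    intro a ha hb
    have hQ := (List.mem_filter.mp ha).2
    have h0 := (by decide : ∀ x ∈ (["brakmarianos", "dragopavo", "fab'huritus", "núcrumos", "selocosa", "sadidas"] : List String), ((["brakmarianos", "dragopavo", "fab'huritus", "núcrumos", "selocosa", "sadidas"] : List String).all fun c => PySem.Str.lower x != c) = false) a hb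
    rw [h0] at hQ
    exact Bool.false_ne_true hQ
  simp only [List.foldl_cons, List.foldl_nil]
  rw [PySem.Set.ofList_eq_self_of_nodup _ (List.Nodup.filter _
    (PySem.Set.nodup_add _ _ (PySem.Set.nodup_add _ _ (PySem.Set.nodup_add _ _
      (PySem.Set.nodup_add _ _ (PySem.Set.nodup_add _ _ (PySem.Set.nodup_add _ _ hs2)))))))]
  rw [pv_filter_add _ _ _ (by decide), pv_filter_add _ _ _ (by decide),
      pv_filter_add _ _ _ (by decide), pv_filter_add _ _ _ (by decide),
      pv_filter_add _ _ _ (by decide), pv_filter_add _ _ _ (by decide)]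
  rw [List.filter_append,
      show List.filter (fun tok => PySem.Str.lower tok != "mechasme") (["brakmarianos", "dragopavo", "fab'huritus", "núcrumos", "selocosa", "sadidas"] : List String) = (["brakmarianos", "dragopavo", "fab'huritus", "núcrumos", "selocosa", "sadidas"] : List String) from by decide,
      List.filter_filter]
  refine congrArg (fun s => PySem.Set.add (PySem.Set.add (PySem.Set.add (PySem.Set.add (PySem.Set.add (PySem.Set.add (s ++ (["brakmarianos", "dragopavo", "fab'huritus", "núcrumos", "selocosa", "sadidas"] : List String)) "Selacubo") (PySem.Str.lower "Selacubo")) "Selaculus") (PySem.Str.lower "Selaculus")) "Selasfera") (PySem.Str.lower "Selasfera")) ?_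
  exact List.filter_congr (fun a _ => by
    simp only [List.all_cons, List.all_nil]
    ac_rfl)

set_option maxHeartbeats 1000000 in
theorem pv_main : ∀ (tokens : List String) (lang_prefix : String),
    apply_ankanimation_token_overrides_py tokens lang_prefix
      = apply_ankanimation_token_overrides_py_alt tokens lang_prefix := by
  intro tokens lang_prefix
  by_cases h : lang_prefix = "es"
  · subst h
    simp only [apply_ankanimation_token_overrides_py, apply_ankanimation_token_overrides_py_alt, pvCF]
    simp only [bne_self_eq_false, Bool.false_eq_true, if_false, if_true]
    generalize hCdef : PySem.Set.ofList (List.filter (fun t => t != "") tokens) = C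
    have hC : C.Nodup := hCdef ▸ PySem.Set.nodup_ofList _
    rw [pv_fold2 ["Brakmarianos", "Dragopavo", "Fab'huritus", "Núcrumos", "Selocosa", "Sadidas"] C hC (by decide) (by decide)]
    rw [show List.map PySem.Str.lower ["Brakmarianos", "Dragopavo", "Fab'huritus", "Núcrumos", "Selocosa", "Sadidas"] = (["brakmarianos", "dragopavo", "fab'huritus", "núcrumos", "selocosa", "sadidas"] : List String) from by decide]
    rw [show (PySem.Set.ofList (["brakmarianos", "dragopavo", "fab'huritus", "núcrumos", "selocosa", "sadidas"] : List String)) = (["brakmarianos", "dragopavo", "fab'huritus", "núcrumos", "selocosa", "sadidas"] : List String) from by decide]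
    rw [show (fun tok => (["Brakmarianos", "Dragopavo", "Fab'huritus", "Núcrumos", "Selocosa", "Sadidas"].all fun b => PySem.Str.lower tok != PySem.Str.lower b)) = (fun tok => ((["brakmarianos", "dragopavo", "fab'huritus", "núcrumos", "selocosa", "sadidas"] : List String).all fun c => PySem.Str.lower tok != c)) from funext fun tok => by
      simp only [List.all_cons, List.all_nil,
        show PySem.Str.lower "Brakmarianos" = "brakmarianos" from by decide,
        show PySem.Str.lower "Dragopavo" = "dragopavo" from by decide,
        show PySem.Str.lower "Fab'huritus" = "fab'huritus" from by decide,
        show PySem.Str.lower "Núcrumos" = "núcrumos" from by decide,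
        show PySem.Str.lower "Selocosa" = "selocosa" from by decide,
        show PySem.Str.lower "Sadidas" = "sadidas" from by decide]]
    rw [pv_condA C]
    rw [show PySem.Set.union (["brakmarianos", "dragopavo", "fab'huritus", "núcrumos", "selocosa", "sadidas"] : List String) ["mechasme"] = (["brakmarianos", "dragopavo", "fab'huritus", "núcrumos", "selocosa", "sadidas", "mechasme"] : List String) from by decide]
    cases hm : List.any C (fun tok => PySem.Str.lower tok == "mechasme") with
    | false =>
      rw [if_neg (by decide : ¬ (false = true)), if_neg (by decide : ¬ (false = true)),
          if_neg (by decide : ¬ (false = true))]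
      rw [pv_B_inner C hC (["brakmarianos", "dragopavo", "fab'huritus", "núcrumos", "selocosa", "sadidas"] : List String) (["brakmarianos", "dragopavo", "fab'huritus", "núcrumos", "selocosa", "sadidas"] : List String) (by decide) (by decide)]
    | true =>
      rw [if_pos (rfl : true = true), if_pos (rfl : true = true), if_pos (rfl : true = true)]
      rw [pv_A_true C hC]
      rw [pv_B_inner C hC (["brakmarianos", "dragopavo", "fab'huritus", "núcrumos", "selocosa", "sadidas", "mechasme"] : List String) (["brakmarianos", "dragopavo", "fab'huritus", "núcrumos", "selocosa", "sadidas"] : List String) (by decide) (by decide)]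
  · simp [apply_ankanimation_token_overrides_py, apply_ankanimation_token_overrides_py_alt, h]

-- ===== VERDICT (by name: the statement is the Claim_ definition above) =====
theorem apply_ankanimation_token_overrides_py_spec : Claim_equal_apply_ankanimation_token_overrides_py := by
  intro tokens lang_prefix _
  exact pv_main tokens lang_prefix
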